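-- pv_equiv track=rewrite | github.com/eSchwander/advent-of-code-2024 | day_2/part2.py | is_modified_report_valid
-- ===== SOURCE A (Python) =====
-- def is_modified_report_valid(report, skip_index):
--     previous_number = None
--
--     for i, num in enumerate(report):
--         if skip_index == i:
--             continue
--         if previous_number is not None and (abs(previous_number - num) > 3 or previous_number >= num):
--             return False
--         previous_number = num
--
--     return True
-- ===== SOURCE B (Python) =====
-- def is_modified_report_valid(report, skip_index):
--     n = len(report)
--     # Check every adjacent pair of the original list that does not touch skip_index,
--     # then bridge across the removed element when it is interior.
--     for i in range(n - 1):
--         if i != skip_index and i + 1 != skip_index: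
--             if not (0 < report[i + 1] - report[i] <= 3):
--                 return False
--     if 0 < skip_index < n - 1:
--         if not (0 < report[skip_index + 1] - report[skip_index - 1] <= 3):
--             return False
--     return True
-- ===== Notes on version B (the rewrite author's own statement) =====
-- stated objective: alternative
-- what changed: Instead of simulating the pass over the filtered sequence with a previous_number state, B never removes anything: it checks every adjacent pair of the ORIGINAL list whose indices avoid skip_index, then adds one constant-time bridge check report[skip_index-1]..report[skip_index+1] when the skipped index is interior.
import Mathlib
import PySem

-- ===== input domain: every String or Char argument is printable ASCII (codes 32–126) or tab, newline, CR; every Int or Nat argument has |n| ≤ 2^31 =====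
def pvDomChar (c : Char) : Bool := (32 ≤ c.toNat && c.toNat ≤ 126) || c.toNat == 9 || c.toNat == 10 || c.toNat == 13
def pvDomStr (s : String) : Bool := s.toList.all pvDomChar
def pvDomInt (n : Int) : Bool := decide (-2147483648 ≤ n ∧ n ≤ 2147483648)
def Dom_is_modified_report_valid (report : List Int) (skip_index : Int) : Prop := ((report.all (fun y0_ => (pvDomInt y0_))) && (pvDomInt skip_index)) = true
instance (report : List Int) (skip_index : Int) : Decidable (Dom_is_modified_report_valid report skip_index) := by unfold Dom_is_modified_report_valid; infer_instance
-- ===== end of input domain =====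

-- B validates the original list by index arithmetic (adjacent pairs avoiding skip_index, plus one
-- bridge check across an interior skipped element) instead of A's stateful pass with previous_number.
-- ===== PORT A =====
-- the loop over enumerate(report) with state previous_number, early return False
def pvA_loop (skip_index : Int) (prev : Option Int) : List (Int × Int) → Bool
  | [] => true
  | (i, num) :: rest =>
    if skip_index = i then pvA_loop skip_index prev rest
    else
      match prev with
      | some p =>
        if 3 < (p - num).natAbs ∨ p ≥ num then false
        else pvA_loop skip_index (some num) rest
      | none => pvA_loop skip_index (some num) rest

def is_modified_report_valid (report : List Int) (skip_index : Int) : Bool :=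
  pvA_loop skip_index none (PySem.List.enumerate report)

-- ===== PORT B =====
def pvOk (a b : Int) : Bool := decide (0 < b - a ∧ b - a ≤ 3)

def is_modified_report_valid_alt (report : List Int) (skip_index : Int) : Bool :=
  let n : Int := report.length
  ((PySem.List.pyRange 0 (n - 1) 1).all (fun i =>
      if i ≠ skip_index ∧ i + 1 ≠ skip_index then
        pvOk (PySem.List.pyGetD report i 0) (PySem.List.pyGetD report (i + 1) 0)
      else true))
  && (if 0 < skip_index ∧ skip_index < n - 1 then
        pvOk (PySem.List.pyGetD report (skip_index - 1) 0)
             (PySem.List.pyGetD report (skip_index + 1) 0)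
      else true)

-- ===== PRECONDITION & SPEC =====
def Spec_is_modified_report_valid (report : List Int) (skip_index : Int) (out : Bool) : Prop := out = is_modified_report_valid_alt report skip_index
instance (report : List Int) (skip_index : Int) (out : Bool) : Decidable (Spec_is_modified_report_valid report skip_index out) := by unfold Spec_is_modified_report_valid; infer_instance

-- ===== CLAIM (what is proved, stated in full; the proofs are below) =====
def Claim_equal_is_modified_report_valid : Prop := ∀ (report : List Int) (skip_index : Int), Dom_is_modified_report_valid report skip_index → Spec_is_modified_report_valid report skip_index (is_modified_report_valid report skip_index)

-- ===== LEMMAS AND PROOFS =====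

-- A's loop on the filtered residue, expressed on plain lists
def pvValid (prev : Option Int) : List Int → Bool
  | [] => true
  | x :: xs =>
    match prev with
    | none => pvValid (some x) xs
    | some p =>
      if 3 < (p - x).natAbs ∨ p ≥ x then false else pvValid (some x) xs

theorem pvA_loop_eq_valid (skip_index : Int) (prev : Option Int) (l : List (Int × Int)) :
    pvA_loop skip_index prev l
      = pvValid prev (l.filterMap (fun p => if p.1 = skip_index then none else some p.2)) := by
  induction l generalizing prev with
  | nil => rfl
  | cons h t ih =>
    obtain ⟨i, num⟩ := h
    by_cases hi : skip_index = i
    · simp only [pvA_loop, List.filterMap_cons, if_pos hi, if_pos hi.symm]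
      exact ih prev
    · have hi' : ¬ (i = skip_index) := fun h => hi h.symm
      cases prev with
      | none =>
        simp only [pvA_loop, List.filterMap_cons, if_neg hi, if_neg hi', pvValid]
        exact ih (some num)
      | some p =>
        by_cases hc : 3 < (p - num).natAbs ∨ p ≥ num
        · simp only [pvA_loop, List.filterMap_cons, if_neg hi, if_neg hi', pvValid, if_pos hc]
        · simp only [pvA_loop, List.filterMap_cons, if_neg hi, if_neg hi', pvValid, if_neg hc]
          exact ih (some num)

-- pvValid with no previous number = "every adjacent pair satisfies pvOk"
theorem pvValid_some_iff (p : Int) (xs : List Int) :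
    pvValid (some p) xs = true ↔ ∀ j (h : j + 1 < (p :: xs).length), pvOk ((p :: xs)[j]'(by omega)) ((p :: xs)[j+1]'h) = true := by
  induction xs generalizing p with
  | nil => simp [pvValid]
  | cons x t ih =>
    by_cases hc : 3 < (p - x).natAbs ∨ p ≥ x
    · simp only [pvValid, if_pos hc]
      constructor
      · intro h; exact absurd h (by simp)
      · intro h
        have h0 := h 0 (by simp)
        simp [pvOk] at h0
        exfalso; omega
    · simp only [pvValid, if_neg hc]
      rw [ih x]
      constructor
      · intro h j hj
        match j with
        | 0 => simp [pvOk]; omega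
        | j+1 =>
          have := h j (by simpa using hj)
          simpa using this
      · intro h j hj
        have := h (j+1) (by simpa using hj)
        simpa using this

theorem pvValid_iff (xs : List Int) :
    pvValid none xs = true ↔ ∀ j (h : j + 1 < xs.length), pvOk (xs[j]'(by omega)) (xs[j+1]'h) = true := by
  cases xs with
  | nil => simp [pvValid]
  | cons x t => exact pvValid_some_iff x t

-- the filtered residue is eraseIdx (or the whole list if skip_index is out of range)
theorem pvFilt (l : List Int) (s k : Int) :
    (PySem.List.enumerate l s).filterMap (fun p => if p.1 = k then none else some p.2)
      = if s ≤ k ∧ k < s + l.length then l.eraseIdx (k - s).toNat else l := by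
  induction l generalizing s with
  | nil => simp [PySem.List.enumerate_nil]
  | cons x t ih =>
    rw [PySem.List.enumerate_cons, List.filterMap_cons]
    by_cases hs : s = k
    · simp only [if_pos hs, ih (s+1)]
      have h1 : (s ≤ k ∧ k < s + (x :: t).length) := by simp; omega
      have h2 : ¬ (s + 1 ≤ k ∧ k < s + 1 + t.length) := by omega
      rw [if_neg h2, if_pos h1]
      have : (k - s).toNat = 0 := by omega
      simp [this]
    · simp only [if_neg hs, ih (s+1)]
      by_cases h1 : s ≤ k ∧ k < s + (x :: t).length
      · have h2 : s + 1 ≤ k ∧ k < s + 1 + t.length := by simp at h1; omega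
        rw [if_pos h2, if_pos h1]
        have h3 : (k - s).toNat = (k - (s+1)).toNat + 1 := by omega
        simp [h3]
      · have h2 : ¬ (s + 1 ≤ k ∧ k < s + 1 + t.length) := by simp at h1; omega
        rw [if_neg h2, if_neg h1]

-- pairs of eraseIdx = non-touching pairs of the original + the bridge pair
theorem pvPairsErase (l : List Int) (m : Nat) (hm : m < l.length) :
    (∀ j (h : j + 1 < (l.eraseIdx m).length), pvOk ((l.eraseIdx m)[j]'(by omega)) ((l.eraseIdx m)[j+1]'h) = true)
      ↔ ((∀ i (h : i + 1 < l.length), i ≠ m → i + 1 ≠ m → pvOk (l[i]'(by omega)) (l[i+1]'h) = true)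
         ∧ (∀ (h1 : 0 < m) (h2 : m + 1 < l.length), pvOk (l[m-1]'(by omega)) (l[m+1]'h2) = true)) := by
  have hlen : (l.eraseIdx m).length = l.length - 1 := by rw [List.length_eraseIdx]; simp [hm]
  constructor
  · intro H
    refine ⟨?_, ?_⟩
    · intro i h hi hi1
      by_cases hlt : i + 1 < m
      · have h' := H i (by omega)
        rwa [List.getElem_eraseIdx_of_lt _ (by omega), List.getElem_eraseIdx_of_lt _ (by omega)] at h'
      · have him : m ≤ i := by omega
        have h' := H (i - 1) (by omega)
        rw [List.getElem_eraseIdx_of_ge _ (by omega), List.getElem_eraseIdx_of_ge _ (by omega)] at h'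
        have e1 : i - 1 + 1 = i := by omega
        have e2 : i - 1 + 1 + 1 = i + 1 := by omega
        simp only [e1] at h'
        exact h'
    · intro h1 h2
      have h' := H (m - 1) (by omega)
      rw [List.getElem_eraseIdx_of_lt _ (by omega), List.getElem_eraseIdx_of_ge _ (by omega)] at h'
      have e2 : m - 1 + 1 + 1 = m + 1 := by omega
      simp only [e2] at h'
      exact h'
  · rintro ⟨H1, H2⟩ j h
    by_cases hj1 : j + 1 < m
    · rw [List.getElem_eraseIdx_of_lt _ (by omega), List.getElem_eraseIdx_of_lt _ (by omega)]
      exact H1 j (by omega) (by omega) (by omega)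
    · by_cases hj2 : j + 1 = m
      · rw [List.getElem_eraseIdx_of_lt _ (by omega), List.getElem_eraseIdx_of_ge _ (by omega)]
        convert H2 (by omega) (by omega) using 3 <;> omega
      · rw [List.getElem_eraseIdx_of_ge _ (by omega), List.getElem_eraseIdx_of_ge _ (by omega)]
        exact H1 (j + 1) (by omega) (by omega) (by omega)

-- B as the same pair of quantified statements
theorem pvB_iff (l : List Int) (k : Int) :
    is_modified_report_valid_alt l k = true
      ↔ ((∀ i (h : i + 1 < l.length), (i : Int) ≠ k → (i : Int) + 1 ≠ k → pvOk (l[i]'(by omega)) (l[i+1]'h) = true)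
         ∧ (0 < k → k + 1 < (l.length : Int) → pvOk (PySem.List.pyGetD l (k-1) 0) (PySem.List.pyGetD l (k+1) 0) = true)) := by
  unfold is_modified_report_valid_alt
  rw [Bool.and_eq_true, List.all_eq_true]
  constructor
  · rintro ⟨Ha, Hb⟩
    refine ⟨?_, ?_⟩
    · intro i h hi hi1
      have hmem : (i : Int) ∈ PySem.List.pyRange 0 ((l.length : Int) - 1) 1 := by
        rw [PySem.List.mem_pyRange_one]; omega
      have := Ha _ hmem
      rw [if_pos ⟨hi, hi1⟩] at this
      rw [PySem.List.pyGetD_eq_getElem l 0 (by omega) (by omega),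
           PySem.List.pyGetD_eq_getElem l 0 (by omega) (by omega)] at this
      have e : ((i : Int) + 1).toNat = i + 1 := by omega
      simp only [e, Int.toNat_natCast] at this
      exact this
    · intro h1 h2
      rwa [if_pos ⟨h1, by omega⟩] at Hb
  · rintro ⟨H1, H2⟩
    refine ⟨?_, ?_⟩
    · intro x hmem
      rw [PySem.List.mem_pyRange_one] at hmem
      by_cases hx : x ≠ k ∧ x + 1 ≠ k
      · rw [if_pos hx]
        rw [PySem.List.pyGetD_eq_getElem l 0 (by omega) (by omega),
            PySem.List.pyGetD_eq_getElem l 0 (by omega) (by omega)]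
        have e : (x + 1).toNat = x.toNat + 1 := by omega
        simp only [e]
        exact H1 x.toNat (by omega) (by omega) (by omega)
      · rw [if_neg hx]
    · by_cases hk : 0 < k ∧ k < (l.length : Int) - 1
      · rw [if_pos hk]; exact H2 hk.1 (by omega)
      · rw [if_neg hk]

-- ===== VERDICT (by name: the statement is the Claim_ definition above) =====
theorem is_modified_report_valid_spec : Claim_equal_is_modified_report_valid := by
  intro l k _
  unfold Spec_is_modified_report_valid is_modified_report_valid
  rw [Bool.eq_iff_iff, pvA_loop_eq_valid, pvFilt l 0 k, pvB_iff]
  by_cases hk : (0:Int) ≤ k ∧ k < 0 + (l.length : Int)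
  · rw [if_pos hk, pvValid_iff, pvPairsErase l (k - 0).toNat (by omega)]
    constructor
    · rintro ⟨P1, P2⟩
      refine ⟨fun i h hi hi1 => P1 i h (by omega) (by omega), ?_⟩
      intro h1 h2
      have hp := P2 (by omega) (by omega)
      rw [PySem.List.pyGetD_eq_getElem l 0 (by omega) (by omega),
          PySem.List.pyGetD_eq_getElem l 0 (by omega) (by omega)]
      have e1 : (k - 1).toNat = (k - 0).toNat - 1 := by omega
      have e2 : (k + 1).toNat = (k - 0).toNat + 1 := by omega
      simp only [e1, e2]
      exact hp
    · rintro ⟨P1, P2⟩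
      refine ⟨fun i h hi hi1 => P1 i h (by omega) (by omega), ?_⟩
      intro h1 h2
      have hp := P2 (by omega) (by omega)
      rw [PySem.List.pyGetD_eq_getElem l 0 (by omega) (by omega),
          PySem.List.pyGetD_eq_getElem l 0 (by omega) (by omega)] at hp
      have e1 : (k - 1).toNat = (k - 0).toNat - 1 := by omega
      have e2 : (k + 1).toNat = (k - 0).toNat + 1 := by omega
      simp only [e1, e2] at hp
      exact hp
  · rw [if_neg hk, pvValid_iff]
    constructor
    · intro P
      exact ⟨fun i h _ _ => P i h, fun h1 h2 => by exfalso; omega⟩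
    · rintro ⟨P1, _⟩ j h
      exact P1 j h (by omega) (by omega)
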